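-- pv_equiv track=rewrite | github.com/shaii120/AOC-2023 | day 14/Assi1.py | get_col_val
-- ===== SOURCE A (Python) =====
-- def calc_val(idx, amount):
--     stop_val = idx + 2
--     start_val = stop_val - amount
--     return sum(range(start_val, stop_val))
--
-- def get_col_val(col):
--     rocks_between_cubes = 0
--     col_val = 0
--
--     for idx, tile in enumerate(reversed(col)):
--         if tile == "O":
--             rocks_between_cubes += 1
--         elif tile == "#":
--             col_val += calc_val(idx - 1, rocks_between_cubes)
--             rocks_between_cubes = 0
--     col_val += calc_val(idx, rocks_between_cubes)
--
--     return col_val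
-- ===== SOURCE B (Python) =====
-- def get_col_val(col):
--     # One forward pass: each 'O' rock rolls up to the current floor and
--     # contributes its settled weight directly.
--     n = len(col)
--     floor = 0
--     total = 0
--     for j, tile in enumerate(col):
--         if tile == "#":
--             floor = j + 1
--         elif tile == "O":
--             total += n - floor
--             floor += 1
--     return total
-- ===== Notes on version B (the rewrite author's own statement) =====
-- stated objective: simpler
-- what changed: Single forward pass that adds each rock's settled weight (n - floor) directly, instead of reversing the list, grouping rocks between cubes and summing sum(range(...)) per group via a helper.
import Mathlib
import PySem

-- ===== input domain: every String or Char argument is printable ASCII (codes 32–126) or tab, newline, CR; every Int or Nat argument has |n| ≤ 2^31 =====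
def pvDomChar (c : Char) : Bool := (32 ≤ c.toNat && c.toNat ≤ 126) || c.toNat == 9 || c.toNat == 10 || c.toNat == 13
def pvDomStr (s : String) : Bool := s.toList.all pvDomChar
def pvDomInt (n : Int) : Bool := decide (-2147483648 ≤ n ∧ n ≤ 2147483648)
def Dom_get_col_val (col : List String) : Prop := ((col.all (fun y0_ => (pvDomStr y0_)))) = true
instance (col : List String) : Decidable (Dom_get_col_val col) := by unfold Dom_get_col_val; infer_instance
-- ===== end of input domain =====

-- B replaces A's reverse + per-group sum(range(...)) with one forward pass adding each rock's weight directly (simpler).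

-- ===== PORT A =====
def calc_val (idx amount : Int) : Int :=
  ((PySem.List.pyRange (idx + 2 - amount) (idx + 2) 1).sum)

def stepA (s : Int × Int) (p : Int × String) : Int × Int :=
  if p.2 == "O" then (s.1 + 1, s.2)
  else if p.2 == "#" then (0, s.2 + calc_val (p.1 - 1) s.1)
  else s

def get_col_val (col : List String) : Int :=
  let st := (PySem.List.enumerate col.reverse 0).foldl stepA (0, 0)
  -- the loop's leftover idx equals col.length - 1 (A raises on []; Pre_ excludes it)
  st.2 + calc_val ((col.length : Int) - 1) st.1

-- ===== PORT B =====
def stepB (n : Int) (s : Int × Int) (p : Int × String) : Int × Int :=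
  if p.2 == "#" then (p.1 + 1, s.2)
  else if p.2 == "O" then (s.1 + 1, s.2 + n - s.1)
  else s

def get_col_val_alt (col : List String) : Int :=
  ((PySem.List.enumerate col 0).foldl (stepB (col.length : Int)) (0, 0)).2

-- ===== PRECONDITION & SPEC =====
-- Pre_ excludes only the empty list, on which A raises UnboundLocalError (idx used after a loop that never ran).
def Pre_get_col_val (col : List String) : Prop := col ≠ []
instance (col : List String) : Decidable (Pre_get_col_val col) := by unfold Pre_get_col_val; infer_instance
def pvWitness_get_col_val : List String := ["O", ".", "#", "O"]

def Spec_get_col_val (col : List String) (out : Int) : Prop := out = get_col_val_alt col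
instance (col : List String) (out : Int) : Decidable (Spec_get_col_val col out) := by unfold Spec_get_col_val; infer_instance

-- ===== CLAIM (what is proved, stated in full; the proofs are below) =====
def Claim_equal_get_col_val : Prop := ∀ (col : List String), Dom_get_col_val col → Pre_get_col_val col → Spec_get_col_val col (get_col_val col)

-- ===== LEMMAS AND PROOFS =====

-- common recursive description: pvT w l = load of l read top-down, w = weight of the next free position
def pvT : Int → List String → Int
  | _, [] => 0
  | w, t :: rest =>
    if t == "#" then pvT (rest.length : Int) rest
    else if t == "O" then w + pvT (w - 1) rest
    else pvT w rest

def gA (l : List String) : Int × Int := (PySem.List.enumerate l.reverse 0).foldl stepA (0, 0)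

theorem calc_val_zero (x : Int) : calc_val x 0 = 0 := by
  simp [calc_val, PySem.List.pyRange_one_eq_nil (by omega : x + 2 ≤ x + 2)]

theorem calc_val_succ (w r : Int) (hr : 0 ≤ r) :
    calc_val (w - 1) (r + 1) = calc_val (w - 2) r + w := by
  unfold calc_val
  have h1 : w - 1 + 2 - (r + 1) = w - r := by ring
  have h2 : w - 2 + 2 - r = w - r := by ring
  have h3 : w - 1 + 2 = w + 1 := by ring
  have h4 : w - 2 + 2 = w := by ring
  rw [h1, h2, h3, h4, PySem.List.pyRange_one_succ_right (by omega : w - r ≤ w)]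
  simp

theorem gA_cons (t : String) (rest : List String) :
    gA (t :: rest) = stepA (gA rest) ((rest.length : Int), t) := by
  simp [gA, PySem.List.enumerate_append]

theorem gA_fst_nonneg (l : List String) : 0 ≤ (gA l).1 := by
  induction l with
  | nil => simp [gA]
  | cons t rest ih =>
    rw [gA_cons]
    unfold stepA
    split_ifs <;> first | exact ih | (dsimp only; omega)

theorem gA_pvT (l : List String) (w : Int) :
    (gA l).2 + calc_val (w - 1) (gA l).1 = pvT w l := by
  induction l generalizing w with
  | nil => simp [gA, pvT, calc_val_zero]
  | cons t rest ih =>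
    rw [gA_cons]
    by_cases hO : t == "O"
    · have hC : (t == "#") = false := by cases (beq_iff_eq.mp hO); decide
      simp only [stepA, pvT, hO, hC, Bool.false_eq_true, if_true, if_false]
      rw [calc_val_succ w (gA rest).1 (gA_fst_nonneg rest)]
      have h1 := ih (w - 1)
      have h2 : w - 1 - 1 = w - 2 := by ring
      rw [h2] at h1
      omega
    · by_cases hC : t == "#"
      · have hO' : (t == "O") = false := by simpa using hO
        simp only [stepA, pvT, hO', hC, Bool.false_eq_true, if_true, if_false]
        rw [calc_val_zero]
        have h1 := ih ((rest.length : Int))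
        omega
      · have hO' : (t == "O") = false := by simpa using hO
        have hC' : (t == "#") = false := by simpa using hC
        simp only [stepA, pvT, hO', hC', Bool.false_eq_true, if_false]
        exact ih w

theorem A_eq_pvT (col : List String) :
    get_col_val col = pvT (col.length : Int) col := by
  have := gA_pvT col (col.length : Int)
  simpa [get_col_val, gA] using this

theorem B_loop (n : Int) (rest : List String) (j0 floor tot : Int)
    (h : j0 + (rest.length : Int) = n) :
    ((PySem.List.enumerate rest j0).foldl (stepB n) (floor, tot)).2
      = tot + pvT (n - floor) rest := by
  induction rest generalizing j0 floor tot with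
  | nil => simp [pvT]
  | cons t rest ih =>
    simp only [List.length_cons] at h
    push_cast at h
    rw [PySem.List.enumerate_cons, List.foldl_cons]
    by_cases hC : t == "#"
    · have hs : stepB n (floor, tot) (j0, t) = (j0 + 1, tot) := by
        simp [stepB, hC]
      rw [hs, ih (j0 + 1) (j0 + 1) tot (by omega)]
      have hx : n - (j0 + 1) = (rest.length : Int) := by omega
      simp only [pvT, hC, if_true, hx]
    · by_cases hO : t == "O"
      · have hs : stepB n (floor, tot) (j0, t) = (floor + 1, tot + n - floor) := by
          simp [stepB, hC, hO]
        rw [hs, ih (j0 + 1) (floor + 1) (tot + n - floor) (by omega)]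
        have hC' : (t == "#") = false := by simpa using hC
        simp only [pvT, hC', Bool.false_eq_true, if_false, hO, if_true]
        have hx : n - (floor + 1) = n - floor - 1 := by ring
        rw [hx]
        ring
      · have hs : stepB n (floor, tot) (j0, t) = (floor, tot) := by
          simp [stepB, hC, hO]
        rw [hs, ih (j0 + 1) floor tot (by omega)]
        have hC' : (t == "#") = false := by simpa using hC
        have hO' : (t == "O") = false := by simpa using hO
        simp only [pvT, hC', hO', Bool.false_eq_true, if_false]

theorem B_eq_pvT (col : List String) :
    get_col_val_alt col = pvT (col.length : Int) col := by
  have := B_loop (col.length : Int) col 0 0 0 (by omega)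
  simpa [get_col_val_alt] using this

-- ===== VERDICT (by name: the statement is the Claim_ definition above) =====
theorem get_col_val_spec : Claim_equal_get_col_val := by
  intro col _ _
  unfold Spec_get_col_val
  rw [A_eq_pvT, B_eq_pvT]
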